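-- pv_equiv track=rewrite | github.com/safety-research/lie-detector | prep/eval3.py | get_task_category
-- ===== SOURCE A (Python) =====
-- from typing import Dict, List, Optional, Any, Tuple
--
-- def get_task_category(task_name: str, category_map: Dict[str, List[str]]) -> Optional[str]:
--     """
--     Get the top-level category for a task.
--
--     Args:
--         task_name: Name of the task
--         category_map: Mapping of categories to task lists
--
--     Returns:
--         Category name or None if not found
--     """
--     # Check exact match first
--     for category, tasks in category_map.items():
--         if task_name in tasks:
--             return category
--
--     # Try with underscore/hyphen variations
--     task_variations = [
--         task_name,
--         task_name.replace('-', '_'),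
--         task_name.replace('_', '-')
--     ]
--
--     # Also try reversed order for two-part names
--     parts = task_name.split('_')
--     if len(parts) == 2:
--         task_variations.append(f"{parts[1]}_{parts[0]}")
--         task_variations.append(f"{parts[1]}-{parts[0]}")
--
--     parts = task_name.split('-')
--     if len(parts) == 2:
--         task_variations.append(f"{parts[1]}-{parts[0]}")
--         task_variations.append(f"{parts[1]}_{parts[0]}")
--
--     for variant in task_variations:
--         for category, tasks in category_map.items():
--             if variant in tasks:
--                 return category
--
--     return None
-- ===== SOURCE B (Python) =====
-- def get_task_category(task_name, category_map):
--     # One pass over category_map keeping the best (lowest-ranked) matching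
--     # variation seen so far; earliest category wins ties via strict '<'.
--     def swapped(sep, joiners):
--         parts = task_name.split(sep)
--         if len(parts) != 2:
--             return []
--         a, b = parts
--         return [b + j + a for j in joiners]
--
--     variations = [task_name,
--                   task_name.replace('-', '_'),
--                   task_name.replace('_', '-')]
--     variations += swapped('_', ['_', '-']) + swapped('-', ['-', '_'])
--
--     best_rank = len(variations)
--     best_cat = None
--     for category, tasks in category_map.items():
--         tasks_set = set(tasks)
--         for rank, v in enumerate(variations):
--             if rank < best_rank and v in tasks_set:
--                 best_rank = rank
--                 best_cat = category
--                 break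
--     return best_cat
-- ===== Notes on version B (the rewrite author's own statement) =====
-- stated objective: alternative
-- what changed: B makes a single pass over category_map with an argmin accumulator (best variation rank and its category, per-category set membership with early break), instead of A's exact-match pass followed by rescanning every category's task list for each variation in turn.
import Mathlib
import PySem

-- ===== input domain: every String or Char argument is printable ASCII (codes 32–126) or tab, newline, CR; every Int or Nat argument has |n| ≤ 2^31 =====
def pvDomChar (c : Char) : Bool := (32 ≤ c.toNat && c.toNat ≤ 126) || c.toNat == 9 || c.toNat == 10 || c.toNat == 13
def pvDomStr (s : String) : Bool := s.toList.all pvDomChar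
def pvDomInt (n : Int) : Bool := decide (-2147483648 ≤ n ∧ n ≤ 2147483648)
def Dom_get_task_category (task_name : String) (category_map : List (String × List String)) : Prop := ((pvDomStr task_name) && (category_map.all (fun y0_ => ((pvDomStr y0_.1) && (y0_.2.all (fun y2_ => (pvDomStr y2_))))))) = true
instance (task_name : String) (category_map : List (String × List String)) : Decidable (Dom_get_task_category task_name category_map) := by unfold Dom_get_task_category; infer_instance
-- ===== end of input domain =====

-- B makes one pass over category_map keeping the lowest-ranked matching variation (argmin accumulator over a set per category), replacing A's exact-match pass plus per-variation rescans of the whole map (alternative algorithm, not claimed faster).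


-- ===== PORT A =====
-- the variation list A builds
def pvVariationsA (task_name : String) : List String :=
  let base := [task_name,
               PySem.Str.replace task_name "-" "_",
               PySem.Str.replace task_name "_" "-"]
  let base2 :=
    match PySem.Str.split? task_name "_" with
    | some [a, b] => base ++ [b ++ "_" ++ a, b ++ "-" ++ a]
    | _ => base
  match PySem.Str.split? task_name "-" with
  | some [a, b] => base2 ++ [b ++ "-" ++ a, b ++ "_" ++ a]
  | _ => base2

-- inner scan: first category whose task list contains v (A's 'for category, tasks in … if v in tasks: return category')
def pvFindCatA (v : String) (l : List (String × List String)) : Option String :=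
  match l with
  | [] => none
  | (c, ts) :: rest => if v ∈ ts then some c else pvFindCatA v rest

-- A's outer loop over the variations, scanning category_map for each
def pvLoopA (vs : List String) (cm : List (String × List String)) : Option String :=
  match vs with
  | [] => none
  | v :: rest =>
    match pvFindCatA v cm with
    | some c => some c
    | none => pvLoopA rest cm

def get_task_category (task_name : String) (category_map : List (String × List String)) : Option String :=
  -- exact-match pass first, then the variations
  match pvFindCatA task_name category_map with
  | some c => some c
  | none => pvLoopA (pvVariationsA task_name) category_map

-- ===== PORT B =====
-- B's swapped(sep, joiners) helper: the reversed two-part forms, [] unless the split has exactly two parts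
def pvSwappedB (task_name sep : String) (joiners : List String) : List String :=
  match PySem.Str.split? task_name sep with
  | some [a, b] => joiners.map (fun j => b ++ j ++ a)
  | _ => []

def pvVariationsB (task_name : String) : List String :=
  [task_name,
   PySem.Str.replace task_name "-" "_",
   PySem.Str.replace task_name "_" "-"]
    ++ pvSwappedB task_name "_" ["_", "-"] ++ pvSwappedB task_name "-" ["-", "_"]

-- B's inner loop: first enumerated variation with rank < best_rank contained in the set; 'break' = return
def pvInnerB (evs : List (Int × String)) (best : Int × Option String) (c : String)
    (ts : PySem.Set String) : Int × Option String :=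
  match evs with
  | [] => best
  | (i, v) :: rest =>
    if i < best.1 ∧ PySem.Set.contains ts v then (i, some c) else pvInnerB rest best c ts

def get_task_category_alt (task_name : String) (category_map : List (String × List String)) : Option String :=
  let variations := pvVariationsB task_name
  (category_map.foldl
      (fun best p => pvInnerB (PySem.List.enumerate variations) best p.1 (PySem.Set.ofList p.2))
      ((variations.length : Int), none)).2

-- ===== PRECONDITION & SPEC =====
def Spec_get_task_category (task_name : String) (category_map : List (String × List String)) (out : Option String) : Prop := out = get_task_category_alt task_name category_map
instance (task_name : String) (category_map : List (String × List String)) (out : Option String) : Decidable (Spec_get_task_category task_name category_map out) := by unfold Spec_get_task_category; infer_instance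

-- ===== CLAIM (what is proved, stated in full; the proofs are below) =====
def Claim_equal_get_task_category : Prop := ∀ (task_name : String) (category_map : List (String × List String)), Dom_get_task_category task_name category_map → Spec_get_task_category task_name category_map (get_task_category task_name category_map)

-- ===== LEMMAS AND PROOFS =====

-- A-style spec of B's accumulator: first entry with rank < r matched anywhere in cm wins
-- (with the first containing category); otherwise the committed (r, bc).
def pvSel (evs : List (Int × String)) (r : Int) (bc : Option String)
    (cm : List (String × List String)) : Int × Option String :=
  match evs with
  | [] => (r, bc)
  | (i, v) :: rest =>
    if i < r then
      match pvFindCatA v cm with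
      | some c => (i, some c)
      | none => pvSel rest r bc cm
    else pvSel rest r bc cm

theorem pvSel_stuck (evs : List (Int × String)) (r : Int) (bc : Option String)
    (cm : List (String × List String)) (h : ∀ q ∈ evs, ¬ q.1 < r) :
    pvSel evs r bc cm = (r, bc) := by
  induction evs with
  | nil => rfl
  | cons q rest ih =>
    obtain ⟨i, v⟩ := q
    have hi := h (i, v) (by simp)
    simp only [pvSel, hi, if_false]
    exact ih (fun q hq => h q (by simp [hq]))

theorem pvSel_cm_nil (evs : List (Int × String)) (r : Int) (bc : Option String) :
    pvSel evs r bc [] = (r, bc) := by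
  induction evs with
  | nil => rfl
  | cons q rest ih =>
    obtain ⟨i, v⟩ := q
    simp only [pvSel, pvFindCatA, ih]
    split <;> rfl

theorem pvInnerB_fst_le (evs : List (Int × String)) (r : Int) (bc : Option String)
    (c : String) (ts : PySem.Set String) : (pvInnerB evs (r, bc) c ts).1 ≤ r := by
  induction evs with
  | nil => simp [pvInnerB]
  | cons q rest ih =>
    obtain ⟨i, v⟩ := q
    simp only [pvInnerB]
    split
    · next h => exact le_of_lt h.1
    · exact ih

theorem pvInnerB_cases (evs : List (Int × String)) (r : Int) (bc : Option String)
    (c : String) (ts : PySem.Set String) :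
    pvInnerB evs (r, bc) c ts = (r, bc) ∨ ∃ q ∈ evs, (pvInnerB evs (r, bc) c ts).1 = q.1 := by
  induction evs with
  | nil => left; rfl
  | cons q rest ih =>
    obtain ⟨i, v⟩ := q
    simp only [pvInnerB]
    split
    · right; exact ⟨(i, v), by simp⟩
    · rcases ih with h | ⟨q, hq, hfst⟩
      · left; exact h
      · right; exact ⟨q, by simp [hq], hfst⟩

-- one category step: updating the accumulator with (c, ts) then resolving against the rest
-- equals resolving against (c, ts) :: rest   (needs strictly increasing ranks)
theorem pvSel_step (c : String) (ts : List String) (rest : List (String × List String))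
    (evs : List (Int × String)) (hs : evs.Pairwise (fun p q => p.1 < q.1)) :
    ∀ (r : Int) (bc : Option String),
    pvSel evs r bc ((c, ts) :: rest)
      = pvSel evs (pvInnerB evs (r, bc) c (PySem.Set.ofList ts)).1
              (pvInnerB evs (r, bc) c (PySem.Set.ofList ts)).2 rest := by
  induction evs with
  | nil => intro r bc; rfl
  | cons q tl ih =>
    intro r bc
    obtain ⟨i, v⟩ := q
    have hlt : ∀ q ∈ tl, i < q.1 := by
      intro q hq; exact (List.pairwise_cons.mp hs).1 q hq
    have hs' : tl.Pairwise (fun p q => p.1 < q.1) := (List.pairwise_cons.mp hs).2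
    have hmem : PySem.Set.contains (PySem.Set.ofList ts) v = true ↔ v ∈ ts := by
      simp [PySem.Set.contains, PySem.Set.mem_ofList]
    by_cases h1 : i < r
    · by_cases h2 : v ∈ ts
      · -- matched in this category: accumulator commits (i, some c) and nothing in tl can beat it
        have : pvInnerB ((i, v) :: tl) (r, bc) c (PySem.Set.ofList ts) = (i, some c) := by
          simp only [pvInnerB]
          rw [if_pos ⟨h1, hmem.mpr h2⟩]
        rw [this]
        simp only [pvSel, h1, if_true, pvFindCatA, h2, if_true, lt_irrefl, if_false]
        rw [pvSel_stuck tl i (some c) rest (fun q hq => not_lt_of_gt (hlt q hq))]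
      · -- not in this category: descend
        have hIB : pvInnerB ((i, v) :: tl) (r, bc) c (PySem.Set.ofList ts)
            = pvInnerB tl (r, bc) c (PySem.Set.ofList ts) := by
          simp only [pvInnerB]
          rw [if_neg]
          intro hc
          exact h2 (hmem.mp hc.2)
        rw [hIB]
        have hip : i < (pvInnerB tl (r, bc) c (PySem.Set.ofList ts)).1 := by
          rcases pvInnerB_cases tl r bc c (PySem.Set.ofList ts) with h | ⟨q, hq, hfst⟩
          · rw [h]; exact h1
          · rw [hfst]; exact hlt q hq
        simp only [pvSel, h1, if_true, hip, if_true, pvFindCatA, h2, if_false]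
        cases hfc : pvFindCatA v rest with
        | some c2 => rfl
        | none => exact ih hs' r bc
    · -- rank already beaten: both sides skip this entry
      have hIB : pvInnerB ((i, v) :: tl) (r, bc) c (PySem.Set.ofList ts)
          = pvInnerB tl (r, bc) c (PySem.Set.ofList ts) := by
        simp only [pvInnerB]
        rw [if_neg]
        intro hc
        exact h1 hc.1
      rw [hIB]
      have hip : ¬ i < (pvInnerB tl (r, bc) c (PySem.Set.ofList ts)).1 := by
        intro hc
        exact h1 (lt_of_lt_of_le hc (pvInnerB_fst_le tl r bc c (PySem.Set.ofList ts)))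
      simp only [pvSel, h1, if_false, hip, if_false]
      exact ih hs' r bc

-- B's whole fold equals the A-style spec
theorem pvFold_eq_sel (evs : List (Int × String)) (hs : evs.Pairwise (fun p q => p.1 < q.1))
    (cm : List (String × List String)) :
    ∀ (r : Int) (bc : Option String),
    cm.foldl (fun best p => pvInnerB evs best p.1 (PySem.Set.ofList p.2)) (r, bc)
      = pvSel evs r bc cm := by
  induction cm with
  | nil => intro r bc; exact (pvSel_cm_nil evs r bc).symm
  | cons p rest ih =>
    intro r bc
    obtain ⟨c, ts⟩ := p
    simp only [List.foldl_cons]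
    rw [show pvInnerB evs (r, bc) c (PySem.Set.ofList ts)
          = ((pvInnerB evs (r, bc) c (PySem.Set.ofList ts)).1,
             (pvInnerB evs (r, bc) c (PySem.Set.ofList ts)).2) from rfl,
        ih, pvSel_step c ts rest evs hs r bc]

-- with every rank below the bound, the spec's answer is A's variation scan
theorem pvSel_snd (evs : List (Int × String)) (r : Int)
    (cm : List (String × List String)) (h : ∀ q ∈ evs, q.1 < r) :
    (pvSel evs r none cm).2 = pvLoopA (evs.map (·.2)) cm := by
  induction evs with
  | nil => rfl
  | cons q rest ih =>
    obtain ⟨i, v⟩ := q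
    have hi : i < r := h (i, v) (by simp)
    simp only [pvSel, hi, if_true, List.map_cons, pvLoopA]
    cases hfc : pvFindCatA v cm with
    | some c => rfl
    | none => exact ih (fun q hq => h q (by simp [hq]))

-- the two variation lists coincide
theorem pvVariations_eq (tn : String) : pvVariationsB tn = pvVariationsA tn := by
  unfold pvVariationsB pvVariationsA pvSwappedB
  dsimp only
  cases h1 : PySem.Str.split? tn "_" with
  | none => cases h2 : PySem.Str.split? tn "-" with
    | none => rfl
    | some l2 => match l2 with
      | [] => rfl
      | [a] => rfl
      | [a, b] => rfl
      | a :: b :: c :: t => rfl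
  | some l1 => match l1 with
    | [] =>
      cases h2 : PySem.Str.split? tn "-" with
      | none => rfl
      | some l2 => match l2 with
        | [] => rfl | [a] => rfl | [a, b] => rfl | a :: b :: c :: t => rfl
    | [a] =>
      cases h2 : PySem.Str.split? tn "-" with
      | none => rfl
      | some l2 => match l2 with
        | [] => rfl | [a'] => rfl | [a', b'] => rfl | a' :: b' :: c' :: t => rfl
    | [a, b] =>
      cases h2 : PySem.Str.split? tn "-" with
      | none => rfl
      | some l2 => match l2 with
        | [] => rfl | [a'] => rfl | [a', b'] => rfl | a' :: b' :: c' :: t => rfl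
    | a :: b :: c :: t =>
      cases h2 : PySem.Str.split? tn "-" with
      | none => rfl
      | some l2 => match l2 with
        | [] => rfl | [a'] => rfl | [a', b'] => rfl | a' :: b' :: c' :: t => rfl

-- the variation list starts with task_name, so A's exact-match pass is its first round
theorem pv_vars_cons (tn : String) : ∃ L, pvVariationsA tn = tn :: L := by
  unfold pvVariationsA
  dsimp only
  split <;> split <;> exact ⟨_, rfl⟩

theorem pv_main (tn : String) (cm : List (String × List String)) :
    get_task_category tn cm = get_task_category_alt tn cm := by
  have hrank : ∀ q ∈ PySem.List.enumerate (pvVariationsB tn),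
      q.1 < ((pvVariationsB tn).length : Int) := by
    intro q hq
    rw [PySem.List.mem_enumerate_iff] at hq
    obtain ⟨k, hk, rfl⟩ := hq
    simp only [zero_add]
    exact_mod_cast hk
  have halt : get_task_category_alt tn cm = pvLoopA (pvVariationsB tn) cm := by
    unfold get_task_category_alt
    dsimp only
    rw [pvFold_eq_sel _ (PySem.List.pairwise_lt_enumerate _ _) cm, pvSel_snd _ _ _ hrank,
      PySem.List.map_snd_enumerate]
  rw [halt, pvVariations_eq]
  obtain ⟨L, hL⟩ := pv_vars_cons tn
  unfold get_task_category
  rw [hL]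
  simp only [pvLoopA]
  cases pvFindCatA tn cm <;> rfl

-- ===== VERDICT (by name: the statement is the Claim_ definition above) =====
theorem get_task_category_spec : Claim_equal_get_task_category := by
  intro tn cm _
  unfold Spec_get_task_category
  exact pv_main tn cm
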